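-- pv_equiv track=rewrite | github.com/skygalaxy-ui/cachdautu | scripts/fix_ai_images.py | inject_images
-- ===== SOURCE A (Python) =====
-- def inject_images(content, image_urls, title):
--     if not content: content = ""
--     paragraphs = content.split('\n\n')
--     new_content = []
--     injected = 0
--     step = max(2, len(paragraphs) // 4)
--
--     for i, p in enumerate(paragraphs):
--         new_content.append(p)
--         if i > 0 and i % step == 0 and injected < len(image_urls) and not p.startswith('#') and not p.startswith('!['):
--             new_content.append(f"\n![Minh hoạ - {title}]({image_urls[injected]})\n")
--             injected += 1
--
--     while injected < len(image_urls):
--         new_content.append(f"\n![Minh hoạ - {title}]({image_urls[injected]})\n")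
--         injected += 1
--
--     return '\n\n'.join(new_content)
-- ===== SOURCE B (Python) =====
-- def inject_images(content, image_urls, title):
--     paragraphs = (content or "").split('\n\n')
--     step = max(2, len(paragraphs) // 4)
--     img = lambda u: f"\n![Minh hoạ - {title}]({u})\n"
--     eligible = [i for i, p in enumerate(paragraphs)
--                 if i > 0 and i % step == 0
--                 and not p.startswith('#') and not p.startswith('![')]
--     placed = list(zip(eligible, image_urls))
--
--     def weave(tail, start, pending):
--         if not pending:
--             return tail
--         (pos, url), rest = pending[0], pending[1:]
--         cut = pos + 1 - start
--         return tail[:cut] + [img(url)] + weave(tail[cut:], pos + 1, rest)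
--
--     extras = [img(u) for u in image_urls[len(placed):]]
--     return '\n\n'.join(weave(paragraphs, 0, placed) + extras)
-- ===== Notes on version B (the rewrite author's own statement) =====
-- stated objective: alternative
-- what changed: A makes one stateful pass over the paragraphs with a running 'injected' counter deciding and consuming images inline plus a trailing while-loop; B instead computes the placement plan (eligible index, image) pairs once and then splices by recursion over the plan, cutting the paragraph list at each placement point with slices, appending the unplanned images at the end.
import Mathlib
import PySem

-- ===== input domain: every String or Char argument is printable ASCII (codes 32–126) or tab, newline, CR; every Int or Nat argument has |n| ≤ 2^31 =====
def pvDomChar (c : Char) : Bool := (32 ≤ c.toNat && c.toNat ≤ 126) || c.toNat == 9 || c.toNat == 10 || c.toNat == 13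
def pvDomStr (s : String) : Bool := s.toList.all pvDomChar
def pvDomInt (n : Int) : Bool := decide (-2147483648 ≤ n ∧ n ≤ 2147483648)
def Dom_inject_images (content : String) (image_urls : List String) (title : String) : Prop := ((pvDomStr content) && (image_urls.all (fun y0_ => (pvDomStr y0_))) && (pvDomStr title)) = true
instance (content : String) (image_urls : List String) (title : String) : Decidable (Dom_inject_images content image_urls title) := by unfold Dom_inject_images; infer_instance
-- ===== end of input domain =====

-- B replaces A's single stateful injection pass (running 'injected' counter + trailing while-loop)
-- by a plan-then-splice scheme: compute the placement list (eligible index, image) once, then a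
-- recursion over the placements that cuts the paragraph list at each placement point; same cost.
-- ===== PORT A =====
-- Port A helpers
def pvImg (title url : String) : String :=
  "\n![Minh hoạ - " ++ title ++ "](" ++ url ++ ")\n"

-- the trailing 'while injected < len(image_urls)' loop of A
def pvTail (image_urls : List String) (title : String) (injected : Nat) : List String :=
  if h : injected < image_urls.length then
    pvImg title image_urls[injected] :: pvTail image_urls title (injected + 1)
  else []
termination_by image_urls.length - injected

def inject_images (content : String) (image_urls : List String) (title : String) : String :=
  let content := if content == "" then "" else content
  let paragraphs := (PySem.Str.split? content "\n\n").getD []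
  let step : Int := max 2 (PySem.Int.floordiv (paragraphs.length : Int) 4)
  let r := (PySem.List.enumerate paragraphs).foldl
    (fun (st : List String × Nat) ip =>
      let nc := st.1 ++ [ip.2]
      if decide (0 < ip.1) && (PySem.Int.mod ip.1 step == 0) && decide (st.2 < image_urls.length)
         && !(PySem.Str.startswith ip.2 "#") && !(PySem.Str.startswith ip.2 "![")
      then (nc ++ [pvImg title (image_urls.getD st.2 "")], st.2 + 1)
      else (nc, st.2))
    ([], 0)
  PySem.Str.join "\n\n" (r.1 ++ pvTail image_urls title r.2)

-- ===== PORT B =====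
-- B-side helper: eligibility of an (index, paragraph) pair
def pvElig (step : Int) (ip : Int × String) : Bool :=
  decide (0 < ip.1) && (PySem.Int.mod ip.1 step == 0)
    && !(PySem.Str.startswith ip.2 "#") && !(PySem.Str.startswith ip.2 "![")

-- Source B's 'weave': recursion over the pending placements, slicing the paragraph list at each one
def pvWeave (title : String) : List String → Int → List (Int × String) → List String
  | tail, _, [] => tail
  | tail, start, (pos, url) :: rest =>
      let cut := pos + 1 - start
      PySem.List.slice tail none (some cut) ++ [pvImg title url]
        ++ pvWeave title (PySem.List.slice tail (some cut) none) (pos + 1) rest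

def inject_images_alt (content : String) (image_urls : List String) (title : String) : String :=
  let paragraphs := (PySem.Str.split? (if content == "" then "" else content) "\n\n").getD []
  let step : Int := max 2 (PySem.Int.floordiv (paragraphs.length : Int) 4)
  let eligible := ((PySem.List.enumerate paragraphs).filter (pvElig step)).map Prod.fst
  let placed := eligible.zip image_urls
  let extras := (PySem.List.slice image_urls (some (placed.length : Int)) none).map
    (fun u => pvImg title u)
  PySem.Str.join "\n\n" (pvWeave title paragraphs 0 placed ++ extras)

-- ===== PRECONDITION & SPEC =====
def Spec_inject_images (content : String) (image_urls : List String) (title : String) (out : String) : Prop := out = inject_images_alt content image_urls title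
instance (content : String) (image_urls : List String) (title : String) (out : String) : Decidable (Spec_inject_images content image_urls title out) := by unfold Spec_inject_images; infer_instance

-- ===== CLAIM (what is proved, stated in full; the proofs are below) =====
def Claim_equal_inject_images : Prop := ∀ (content : String) (image_urls : List String) (title : String), Dom_inject_images content image_urls title → Spec_inject_images content image_urls title (inject_images content image_urls title)

-- ===== LEMMAS AND PROOFS =====
-- association-list lookup (first match), the common denominator of both programs' image placement
def pvLook (pairs : List (Int × String)) (x : Int) : Option String :=
  (pairs.find? (fun p => p.1 == x)).map (·.2)

lemma pv_look_none (pairs : List (Int × String)) (x : Int) (h : x ∉ pairs.map Prod.fst) :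
    pvLook pairs x = none := by
  simp only [pvLook, Option.map_eq_none_iff, List.find?_eq_none]
  intro p hp he
  exact h ((eq_of_beq he) ▸ List.mem_map_of_mem hp)

lemma pv_zip_fst_mem {x : Int} {P : List Int} {us : List String}
    (h : x ∈ (P.zip us).map Prod.fst) : x ∈ P := by
  obtain ⟨q, hq, rfl⟩ := List.mem_map.1 h
  exact (List.of_mem_zip hq).1

lemma pv_flatMap_congr {α β : Type} (l : List α) (f g : α → List β)
    (h : ∀ a ∈ l, f a = g a) : l.flatMap f = l.flatMap g := by
  simp only [List.flatMap_def]
  exact congrArg List.flatten (List.map_congr_left h)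

lemma pvTail_eq (image_urls : List String) (title : String) (j : Nat) :
    pvTail image_urls title j = (image_urls.drop j).map (pvImg title) := by
  rw [pvTail]
  split
  · next h =>
    rw [List.drop_eq_getElem_cons h, List.map_cons, pvTail_eq image_urls title (j + 1)]
  · next h =>
    rw [List.drop_eq_nil_of_le (by omega)]
    rfl
termination_by image_urls.length - j

-- the main loop invariant: A's stateful fold = an index-lookup flatMap, plus the final counter
lemma pv_cond (a b q c d : Bool) : (a && b && q && c && d) = (q && (a && b && c && d)) := by
  cases a <;> cases b <;> cases q <;> cases c <;> cases d <;> rfl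

lemma pv_loop' (imgs : List String) (title : String) (step : Int) :
    ∀ (L : List (Int × String)) (acc : List String) (j : Nat),
      (L.map Prod.fst).Nodup →
      L.foldl (fun (st : List String × Nat) ip =>
          let nc := st.1 ++ [ip.2]
          if decide (st.2 < imgs.length) && pvElig step ip
          then (nc ++ [pvImg title (imgs.getD st.2 "")], st.2 + 1)
          else (nc, st.2)) (acc, j)
      = (acc ++ L.flatMap (fun ip =>
            ip.2 :: (match pvLook (((L.filter (pvElig step)).map Prod.fst).zip (imgs.drop j)) ip.1 with
                     | some u => [pvImg title u] | none => [])),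
         j + min ((L.filter (pvElig step)).map Prod.fst).length (imgs.length - j)) := by
  intro L
  induction L with
  | nil =>
    intro acc j _
    simp
  | cons hd tl ih =>
    obtain ⟨i, p⟩ := hd
    intro acc j hnd
    rw [List.map_cons, List.nodup_cons] at hnd
    obtain ⟨hi, hnd'⟩ := hnd
    have hsub : ∀ (rest : List String) (x : Int),
        x ∈ (((tl.filter (pvElig step)).map Prod.fst).zip rest).map Prod.fst →
        x ∈ tl.map Prod.fst := by
      intro rest x hx
      obtain ⟨a, ha, hax⟩ := List.mem_map.1 (pv_zip_fst_mem hx)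
      exact hax ▸ List.mem_map_of_mem (List.mem_of_mem_filter ha)
    rw [List.foldl_cons]
    by_cases he : pvElig step (i, p)
    · by_cases hj : j < imgs.length
      · have hc : (decide (j < imgs.length) && pvElig step (i, p)) = true := by simp [he, hj]
        simp only [hc, if_true]
        rw [ih (acc ++ [p] ++ [pvImg title (imgs.getD j "")]) (j + 1) hnd']
        rw [List.filter_cons_of_pos he]
        simp only [List.map_cons, List.flatMap_cons, List.length_cons]
        rw [List.drop_eq_getElem_cons hj]
        simp only [List.zip_cons_cons]
        have hhead : pvLook ((i, imgs[j]) ::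
            (((tl.filter (pvElig step)).map Prod.fst).zip (imgs.drop (j + 1)))) i
            = some imgs[j] := by
          simp [pvLook]
        have htail := pv_flatMap_congr tl
          (fun ip => ip.2 :: (match pvLook ((i, imgs[j]) ::
              (((tl.filter (pvElig step)).map Prod.fst).zip (imgs.drop (j + 1)))) ip.1 with
            | some u => [pvImg title u] | none => []))
          (fun ip => ip.2 :: (match pvLook
              (((tl.filter (pvElig step)).map Prod.fst).zip (imgs.drop (j + 1))) ip.1 with
            | some u => [pvImg title u] | none => []))
          (by
            intro a ha
            have hne : (i == a.1) = false := by
              refine beq_eq_false_iff_ne.2 (fun h => hi ?_)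
              rw [h]
              exact List.mem_map.2 ⟨a, ha, rfl⟩
            simp [pvLook, hne])
        rw [List.getD_eq_getElem imgs "" hj]
        refine Prod.ext ?_ ?_
        · simp only [hhead, ← htail, List.append_assoc, List.cons_append, List.nil_append]
        · simp only []
          omega
      · have hc : (decide (j < imgs.length) && pvElig step (i, p)) = false := by simp [hj]
        simp only [hc, if_false, Bool.false_eq_true]
        rw [ih (acc ++ [p]) j hnd']
        have hd0 : imgs.drop j = ([] : List String) := List.drop_eq_nil_of_le (by omega)
        rw [List.filter_cons_of_pos he, hd0]
        simp only [List.map_cons, List.flatMap_cons, List.length_cons, List.zip_nil_right]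
        refine Prod.ext ?_ ?_
        · simp [pvLook, List.append_assoc]
        · simp only []
          omega
    · have hc : (decide (j < imgs.length) && pvElig step (i, p)) = false := by simp [he]
      simp only [hc, if_false, Bool.false_eq_true]
      rw [ih (acc ++ [p]) j hnd']
      rw [List.filter_cons_of_neg he]
      have hhead : pvLook (((tl.filter (pvElig step)).map Prod.fst).zip (imgs.drop j)) i
          = none := pv_look_none _ _ (fun hx => hi (hsub _ _ hx))
      simp only [List.flatMap_cons, hhead, List.append_assoc, List.cons_append, List.nil_append]

lemma pv_loop (imgs : List String) (title : String) (step : Int) :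
    ∀ (L : List (Int × String)) (acc : List String) (j : Nat),
      (L.map Prod.fst).Nodup →
      L.foldl (fun (st : List String × Nat) ip =>
          let nc := st.1 ++ [ip.2]
          if decide (0 < ip.1) && (PySem.Int.mod ip.1 step == 0) && decide (st.2 < imgs.length)
             && !(PySem.Str.startswith ip.2 "#") && !(PySem.Str.startswith ip.2 "![")
          then (nc ++ [pvImg title (imgs.getD st.2 "")], st.2 + 1)
          else (nc, st.2)) (acc, j)
      = (acc ++ L.flatMap (fun ip =>
            ip.2 :: (match pvLook (((L.filter (pvElig step)).map Prod.fst).zip (imgs.drop j)) ip.1 with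
                     | some u => [pvImg title u] | none => [])),
         j + min ((L.filter (pvElig step)).map Prod.fst).length (imgs.length - j)) := by
  have hfe : (fun (st : List String × Nat) (ip : Int × String) =>
          let nc := st.1 ++ [ip.2]
          if decide (0 < ip.1) && (PySem.Int.mod ip.1 step == 0) && decide (st.2 < imgs.length)
             && !(PySem.Str.startswith ip.2 "#") && !(PySem.Str.startswith ip.2 "![")
          then (nc ++ [pvImg title (imgs.getD st.2 "")], st.2 + 1)
          else (nc, st.2))
      = (fun (st : List String × Nat) ip =>
          let nc := st.1 ++ [ip.2]
          if decide (st.2 < imgs.length) && pvElig step ip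
          then (nc ++ [pvImg title (imgs.getD st.2 "")], st.2 + 1)
          else (nc, st.2)) := by
    funext st ip
    simp only [pvElig, pv_cond]
    rfl
  rw [hfe]
  exact pv_loop' imgs title step

-- one woven segment: indices s..pos over xs, the image going exactly after the last paragraph
lemma pv_seg (m : String) (xs : List String) :
    ∀ (s pos : Int), s ≤ pos → s + (xs.length : Int) = pos + 1 →
      (PySem.List.enumerate xs s).flatMap
          (fun ip => ip.2 :: (if ip.1 == pos then [m] else [])) = xs ++ [m] := by
  induction xs with
  | nil =>
    intro s pos h1 h2
    simp only [List.length_nil, Nat.cast_zero, add_zero] at h2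
    omega
  | cons x xs ih =>
    intro s pos h1 h2
    rw [PySem.List.enumerate_cons, List.flatMap_cons]
    cases xs with
    | nil =>
      have hs : s = pos := by
        simp only [List.length_cons, List.length_nil] at h2
        push_cast at h2
        omega
      simp [hs, PySem.List.enumerate_nil]
    | cons y ys =>
      have hne : (s == pos) = false := by
        refine beq_eq_false_iff_ne.2 (fun h => ?_)
        simp only [List.length_cons] at h2
        push_cast at h2
        omega
      rw [ih (s + 1) pos (by simp only [List.length_cons] at h2; push_cast at h2 ⊢; omega)
        (by simp only [List.length_cons] at h2 ⊢; push_cast at h2 ⊢; omega)]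
      simp [hne]

-- Source B's weave on a strictly increasing, in-range placement plan = the index-lookup flatMap
lemma pv_weave (title : String) (P : List Int) :
    ∀ (us tail : List String) (s : Int),
      P.Pairwise (· < ·) →
      (∀ p ∈ P, s ≤ p ∧ p < s + (tail.length : Int)) →
      pvWeave title tail s (P.zip us)
        = (PySem.List.enumerate tail s).flatMap
            (fun ip => ip.2 :: (match pvLook (P.zip us) ip.1 with
                                | some u => [pvImg title u] | none => [])) := by
  induction P with
  | nil =>
    intro us tail s _ _
    simp only [List.zip_nil_left, pvWeave]
    have h := pv_flatMap_congr (PySem.List.enumerate tail s)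
      (fun ip => ip.2 :: (match pvLook ([] : List (Int × String)) ip.1 with
                          | some u => [pvImg title u] | none => []))
      (fun ip => [ip.2]) (by intro a _; simp [pvLook])
    rw [h]
    rw [show (fun (ip : Int × String) => [ip.2]) = (fun ip => [(·.2) ip]) from rfl]
    rw [← List.map_eq_flatMap, PySem.List.map_snd_enumerate]
  | cons pos P' ih =>
    intro us tail s hpw hbd
    cases us with
    | nil =>
      simp only [List.zip_nil_right, pvWeave]
      have h := pv_flatMap_congr (PySem.List.enumerate tail s)
        (fun ip => ip.2 :: (match pvLook ([] : List (Int × String)) ip.1 with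
                            | some u => [pvImg title u] | none => []))
        (fun ip => [ip.2]) (by intro a _; simp [pvLook])
      rw [h]
      rw [show (fun (ip : Int × String) => [ip.2]) = (fun ip => [(·.2) ip]) from rfl]
      rw [← List.map_eq_flatMap, PySem.List.map_snd_enumerate]
    | cons u us' =>
      obtain ⟨hs, hlt⟩ := hbd pos (List.mem_cons_self)
      have hkeys : ∀ q ∈ P', pos < q := fun q hq => (List.pairwise_cons.1 hpw).1 q hq
      have hc0 : (0 : Int) ≤ pos + 1 - s := by omega
      set c : Nat := (pos + 1 - s).toNat with hc
      have hcl : c ≤ tail.length := by omega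
      have hsc : s + (c : Int) = pos + 1 := by omega
      rw [List.zip_cons_cons, pvWeave]
      rw [PySem.List.slice_to _ hc0, PySem.List.slice_from _ hc0, ← hc]
      rw [ih us' (tail.drop c) (pos + 1) (List.pairwise_cons.1 hpw).2
        (by
          intro p hp
          obtain ⟨_, h2⟩ := hbd p (List.mem_cons_of_mem _ hp)
          have := hkeys p hp
          rw [List.length_drop]
          omega)]
      conv_rhs => rw [← List.take_append_drop c tail, PySem.List.enumerate_append,
        List.flatMap_append, List.length_take, Nat.min_eq_left hcl]
      rw [show s + ((c : Nat) : Int) = pos + 1 from hsc]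
      have hsecond := pv_flatMap_congr (PySem.List.enumerate (tail.drop c) (pos + 1))
        (fun ip => ip.2 :: (match pvLook ((pos, u) :: P'.zip us') ip.1 with
                            | some u => [pvImg title u] | none => []))
        (fun ip => ip.2 :: (match pvLook (P'.zip us') ip.1 with
                            | some u => [pvImg title u] | none => []))
        (by
          intro a ha
          rw [PySem.List.mem_enumerate_iff] at ha
          obtain ⟨k, hk, rfl⟩ := ha
          have hne : (pos == pos + 1 + (k : Int)) = false := by
            refine beq_eq_false_iff_ne.2 (fun h => ?_)
            omega
          simp [pvLook, hne])
      rw [hsecond]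
      have hfirst := pv_flatMap_congr (PySem.List.enumerate (tail.take c) s)
        (fun ip => ip.2 :: (match pvLook ((pos, u) :: P'.zip us') ip.1 with
                            | some u => [pvImg title u] | none => []))
        (fun ip => ip.2 :: (if ip.1 == pos then [pvImg title u] else []))
        (by
          intro a ha
          rw [PySem.List.mem_enumerate_iff] at ha
          obtain ⟨k, hk, rfl⟩ := ha
          rw [List.length_take, Nat.min_eq_left hcl] at hk
          by_cases he : s + (k : Int) = pos
          · have : (pos == s + (k : Int)) = true := by simp [he]
            simp [pvLook, he]
          · have hne : (pos == s + (k : Int)) = false := beq_eq_false_iff_ne.2 (fun h => he h.symm)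
            have hnone : pvLook (P'.zip us') (s + (k : Int)) = none := by
              refine pv_look_none _ _ (fun hx => ?_)
              have := hkeys _ (pv_zip_fst_mem hx)
              omega
            have hcons : pvLook ((pos, u) :: P'.zip us') (s + (k : Int))
                = pvLook (P'.zip us') (s + (k : Int)) := by
              simp [pvLook, List.find?, hne]
            have hif : ((s + (k : Int)) == pos) = false := beq_eq_false_iff_ne.2 he
            dsimp only
            rw [hcons]
            simp [hnone, hif])
      rw [hfirst]
      rw [pv_seg (pvImg title u) (tail.take c) s pos hs
        (by rw [List.length_take, Nat.min_eq_left hcl]; omega)]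

-- ===== VERDICT (by name: the statement is the Claim_ definition above) =====
theorem inject_images_spec : Claim_equal_inject_images := by
  intro content image_urls title _
  unfold Spec_inject_images inject_images inject_images_alt
  dsimp only
  generalize (PySem.Str.split? (if content == "" then "" else content) "\n\n").getD [] = ps
  set step := max 2 (PySem.Int.floordiv ((ps.length : Int)) 4) with hstep
  set L := PySem.List.enumerate ps with hL
  set E := (L.filter (pvElig step)).map Prod.fst with hE
  have hndL : (L.map Prod.fst).Nodup := by
    have hp := PySem.List.pairwise_lt_enumerate ps 0
    exact List.pairwise_map.mpr (hp.imp fun h => ne_of_lt h)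
  have hpwE : E.Pairwise (· < ·) := by
    have hp := PySem.List.pairwise_lt_enumerate ps 0
    exact List.pairwise_map.mpr (hp.sublist List.filter_sublist)
  have hbdE : ∀ p ∈ E, (0 : Int) ≤ p ∧ p < 0 + (ps.length : Int) := by
    intro p hp
    obtain ⟨ip, hip, rfl⟩ := List.mem_map.1 hp
    have hmem := List.mem_of_mem_filter hip
    rw [hL, PySem.List.mem_enumerate_iff] at hmem
    obtain ⟨k, hk, rfl⟩ := hmem
    constructor <;> [omega; (push_cast; omega)]
  rw [pv_loop image_urls title step L [] 0 hndL, pvTail_eq]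
  rw [pv_weave title E image_urls ps 0 hpwE hbdE]
  rw [PySem.List.slice_from image_urls (by positivity)]
  rw [List.length_zip]
  simp only [List.drop_zero, Int.toNat_natCast, List.nil_append, ← hE, ← hL]
  have hmin : 0 + min E.length (image_urls.length - 0) = min E.length image_urls.length := by
    omega
  rw [hmin]
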